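-- pv_equiv track=rewrite | github.com/PrincetonUniversity/cutqc2 | src/cutqc2/core/utils.py | mutate_measurement_basis
-- ===== SOURCE A (Python) =====
-- import itertools
--
-- def mutate_measurement_basis(meas: tuple[str]) -> list[tuple[str]]:
--     """
--     Expand a measurement-basis specification by replacing identity entries
--     with both identity and Z bases.
--
--     If all entries are non-identity (no "I" present), the function returns a
--     singleton list containing the original `meas`. Otherwise, for each qubit
--     position with basis "I", it generates two alternatives: "I" and "Z". The
--     Cartesian product across positions yields all mutated basis tuples.
--
--     Parameters
--     ----------
--     meas : Sequence[str]
--         Per-qubit measurement bases (e.g., "comp", "X", "Y", "I").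
--
--     Returns
--     -------
--     list[tuple[str, ...]]
--         All mutated measurement-basis tuples. If no mutation is needed, this is
--         `[meas]`.
--     """
--     if all(x != "I" for x in meas):
--         return [meas]
--     mutated_meas = []
--     for x in meas:
--         if x != "I":
--             mutated_meas.append([x])
--         else:
--             mutated_meas.append(["I", "Z"])
--     return list(itertools.product(*mutated_meas))
-- ===== SOURCE B (Python) =====
-- def mutate_measurement_basis(meas):
--     k = sum(1 for x in meas if x == "I")
--     out = []
--     for mask in range(2 ** k):
--         j = k
--         row = []
--         for x in meas:
--             if x == "I":
--                 j -= 1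
--                 row.append("Z" if (mask >> j) & 1 else "I")
--             else:
--                 row.append(x)
--         out.append(tuple(row))
--     return out
-- ===== Notes on version B (the rewrite author's own statement) =====
-- stated objective: alternative
-- what changed: B replaces the per-position option lists plus itertools.product with a direct enumeration of the 2^k bitmasks over the k identity positions, decoding each mask into a row (last 'I' position = least significant bit).
import Mathlib
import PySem

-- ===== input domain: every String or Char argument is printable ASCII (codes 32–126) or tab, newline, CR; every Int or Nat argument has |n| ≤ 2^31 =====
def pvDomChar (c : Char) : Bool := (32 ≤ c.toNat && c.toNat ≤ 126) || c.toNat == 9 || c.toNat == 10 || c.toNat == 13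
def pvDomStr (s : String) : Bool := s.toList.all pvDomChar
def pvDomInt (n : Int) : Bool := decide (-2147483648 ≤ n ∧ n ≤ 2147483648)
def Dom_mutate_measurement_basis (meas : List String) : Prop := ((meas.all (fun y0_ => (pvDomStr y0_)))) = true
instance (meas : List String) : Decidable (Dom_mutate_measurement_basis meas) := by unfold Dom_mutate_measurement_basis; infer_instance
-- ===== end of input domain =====

-- B enumerates the 2^k bitmasks over the k 'I' positions instead of building option
-- lists and taking their cartesian product; same cost, different decomposition.

-- ===== PORT A =====
-- the loop building mutated_meas (append per element)
def pvBuildMutated : List String → List (List String)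
  | [] => []
  | x :: xs => (if x ≠ "I" then [x] else ["I", "Z"]) :: pvBuildMutated xs

-- itertools.product(*lists): leftmost factor varies slowest
def pvProd : List (List String) → List (List String)
  | [] => [[]]
  | l :: ls => l.flatMap (fun c => (pvProd ls).map (fun t => c :: t))

def mutate_measurement_basis (meas : List String) : List (List String) :=
  if meas.all (fun x => x != "I") then [meas]
  else pvProd (pvBuildMutated meas)

-- ===== PORT B =====
-- k = sum(1 for x in meas if x == "I")
def pvCountI : List String → Nat
  | [] => 0
  | x :: xs => (if x == "I" then 1 else 0) + pvCountI xs

-- inner loop: decode one mask into a row (j counts remaining 'I's, decremented before use)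
def pvRow : List String → Nat → Nat → List String
  | [], _, _ => []
  | x :: xs, j, mask =>
    if x == "I" then
      (if (mask >>> (j - 1)) &&& 1 ≠ 0 then "Z" else "I") :: pvRow xs (j - 1) mask
    else
      x :: pvRow xs j mask

def mutate_measurement_basis_alt (meas : List String) : List (List String) :=
  (List.range (2 ^ pvCountI meas)).map (fun mask => pvRow meas (pvCountI meas) mask)

-- ===== PRECONDITION & SPEC =====
def Spec_mutate_measurement_basis (meas : List String) (out : List (List String)) : Prop := out = mutate_measurement_basis_alt meas
instance (meas : List String) (out : List (List String)) : Decidable (Spec_mutate_measurement_basis meas out) := by unfold Spec_mutate_measurement_basis; infer_instance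

-- ===== CLAIM (what is proved, stated in full; the proofs are below) =====
def Claim_equal_mutate_measurement_basis : Prop := ∀ (meas : List String), Dom_mutate_measurement_basis meas → Spec_mutate_measurement_basis meas (mutate_measurement_basis meas)

-- ===== LEMMAS AND PROOFS =====

-- when no 'I' occurs the product of singletons is just [meas]
theorem pvProd_no_I (meas : List String) (h : meas.all (fun x => x != "I") = true) :
    pvProd (pvBuildMutated meas) = [meas] := by
  induction meas with
  | nil => rfl
  | cons x xs ih =>
    simp only [List.all_cons, Bool.and_eq_true] at h
    have hx : x ≠ "I" := by simpa using h.1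
    simp [pvBuildMutated, pvProd, hx, ih h.2]

-- pvRow only reads bits below j of the mask
theorem pvRow_add (xs : List String) (j m t : Nat) (h : pvCountI xs ≤ j) :
    pvRow xs j (m + 2 ^ j * t) = pvRow xs j m := by
  induction xs generalizing j m t with
  | nil => rfl
  | cons x xs ih =>
    by_cases hx : x = "I"
    · subst hx
      have hc : pvCountI ("I" :: xs) = 1 + pvCountI xs := by simp [pvCountI]
      rw [hc] at h
      obtain ⟨j', rfl⟩ : ∃ j', j = j' + 1 := ⟨j - 1, by omega⟩
      have hsplit : (2 : ℕ) ^ (j' + 1) * t = 2 ^ j' * (2 * t) := by ring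
      have hbit : ((m + 2 ^ (j' + 1) * t) >>> j') &&& 1 = (m >>> j') &&& 1 := by
        rw [Nat.shiftRight_eq_div_pow, Nat.shiftRight_eq_div_pow, hsplit,
          Nat.add_mul_div_left _ _ (Nat.two_pow_pos j'),
          Nat.and_one_is_mod, Nat.and_one_is_mod]
        omega
      simp only [pvRow, beq_self_eq_true, if_true, Nat.add_sub_cancel, hbit]
      rw [hsplit, ih j' m (2 * t) (by omega)]
    · have hc : pvCountI xs ≤ j := by simp [pvCountI, hx] at h ⊢; omega
      simp only [pvRow, beq_iff_eq, hx, if_false]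
      rw [ih j m t hc]

-- the cartesian product equals the mask enumeration
theorem pvProd_eq_masks (meas : List String) :
    pvProd (pvBuildMutated meas) =
      (List.range (2 ^ pvCountI meas)).map (fun mask => pvRow meas (pvCountI meas) mask) := by
  induction meas with
  | nil => rfl
  | cons x xs ih =>
    by_cases hx : x = "I"
    · subst hx
      have hc : pvCountI ("I" :: xs) = 1 + pvCountI xs := by simp [pvCountI]
      set k := pvCountI xs with hk
      have hpow : (2 : ℕ) ^ (1 + k) = 2 ^ k + 2 ^ k := by rw [pow_add]; ring
      rw [show pvBuildMutated ("I" :: xs) = ["I", "Z"] :: pvBuildMutated xs from by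
        simp [pvBuildMutated]]
      rw [show pvProd (["I", "Z"] :: pvBuildMutated xs) =
        (pvProd (pvBuildMutated xs)).map (fun t => "I" :: t) ++
        (pvProd (pvBuildMutated xs)).map (fun t => "Z" :: t) from by simp [pvProd]]
      rw [ih, hc, hpow, List.range_add]
      simp only [List.map_append, List.map_map]
      congr 1
      · apply List.map_congr_left
        intro m hm
        rw [List.mem_range] at hm
        have hz : m >>> k = 0 := by
          rw [Nat.shiftRight_eq_div_pow]; exact Nat.div_eq_of_lt hm
        simp [pvRow, hz, show 1 + k - 1 = k from by omega]
      · apply List.map_congr_left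
        intro m hm
        rw [List.mem_range] at hm
        have hbit : ((2 ^ k + m) >>> k) % 2 = 1 := by
          rw [Nat.shiftRight_eq_div_pow,
            Nat.add_div_left _ (Nat.two_pow_pos k), Nat.div_eq_of_lt hm]
        have htail : pvRow xs k (2 ^ k + m) = pvRow xs k m := by
          have := pvRow_add xs k m 1 (le_of_eq hk.symm)
          simpa [Nat.add_comm] using this
        simp [pvRow, hbit, htail, show 1 + k - 1 = k from by omega]
    · have hc : pvCountI (x :: xs) = pvCountI xs := by simp [pvCountI, hx]
      rw [show pvBuildMutated (x :: xs) = [x] :: pvBuildMutated xs from by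
        simp [pvBuildMutated, hx]]
      rw [show pvProd ([x] :: pvBuildMutated xs) =
        (pvProd (pvBuildMutated xs)).map (fun t => x :: t) from by simp [pvProd]]
      rw [ih, hc, List.map_map]
      apply List.map_congr_left
      intro m _
      simp [pvRow, hx]

theorem mutate_eq_prod (meas : List String) :
    mutate_measurement_basis meas = pvProd (pvBuildMutated meas) := by
  unfold mutate_measurement_basis
  split_ifs with h
  · exact (pvProd_no_I meas h).symm
  · rfl

-- ===== VERDICT (by name: the statement is the Claim_ definition above) =====
theorem mutate_measurement_basis_spec : Claim_equal_mutate_measurement_basis := by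
  intro meas _
  unfold Spec_mutate_measurement_basis mutate_measurement_basis_alt
  rw [mutate_eq_prod, pvProd_eq_masks]
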